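-- pv_equiv track=rewrite | github.com/HyonBok/AlgoritmoComunicacao | mlt3.py | mlt3_encode
-- ===== SOURCE A (Python) =====
-- def mlt3_encode(bin):
--     mlt3 = []
--     last = 0
--     adder = 1
--     for bit in bin:
--         if bit == 0:
--             mlt3.append(last)
--         else:
--             if (last == 1 or last == -1):
--                 adder = -adder
--             mlt3.append(last + adder)
--             last = last + adder
--     return mlt3
-- ===== SOURCE B (Python) =====
-- LEVELS = [0, 1, 0, -1]
--
-- def mlt3_encode(bin):
--     out = []
--     ones = 0
--     for bit in bin:
--         if bit != 0:
--             ones += 1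
--         out.append(LEVELS[ones % 4])
--     return out
-- ===== Notes on version B (the rewrite author's own statement) =====
-- stated objective: idiomatic
-- what changed: Replaced the last/adder sign-toggling state machine by a running count of non-zero bits and a constant 4-entry level table indexed by the count mod 4.
import Mathlib
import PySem

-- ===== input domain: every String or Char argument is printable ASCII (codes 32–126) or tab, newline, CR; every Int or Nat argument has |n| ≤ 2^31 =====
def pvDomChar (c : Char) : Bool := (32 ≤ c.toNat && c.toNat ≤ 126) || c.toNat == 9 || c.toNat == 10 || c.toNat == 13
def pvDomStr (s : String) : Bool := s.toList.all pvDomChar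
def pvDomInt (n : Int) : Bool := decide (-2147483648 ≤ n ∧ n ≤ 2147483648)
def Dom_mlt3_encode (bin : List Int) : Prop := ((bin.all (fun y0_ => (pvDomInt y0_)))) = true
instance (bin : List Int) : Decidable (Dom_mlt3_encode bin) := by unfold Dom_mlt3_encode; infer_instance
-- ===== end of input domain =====

-- B replaces A's last/adder sign-toggling state machine by a ones-counter and a mod-4 level table (idiomatic; same cost).


-- ===== PORT A =====
-- for bit in bin: if bit == 0 append last, else flip adder when last = ±1, append/update last + adder
def mlt3Loop (bin : List Int) (mlt3 : List Int) (last adder : Int) : List Int :=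
  match bin with
  | [] => mlt3
  | bit :: rest =>
    if bit == 0 then
      mlt3Loop rest (mlt3 ++ [last]) last adder
    else
      let adder' := if last == 1 || last == -1 then -adder else adder
      mlt3Loop rest (mlt3 ++ [last + adder']) (last + adder') adder'

def mlt3_encode (bin : List Int) : List Int := mlt3Loop bin [] 0 1

-- ===== PORT B =====
def LEVELS : List Int := [0, 1, 0, -1]

-- for bit in bin: bump ones on a non-zero bit, append LEVELS[ones % 4]
def mlt3AltLoop (bin : List Int) (out : List Int) (ones : Int) : List Int :=
  match bin with
  | [] => out
  | bit :: rest =>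
    let ones' := if bit != 0 then ones + 1 else ones
    mlt3AltLoop rest (out ++ [LEVELS.getD (PySem.Int.mod ones' 4).toNat 0]) ones'

def mlt3_encode_alt (bin : List Int) : List Int := mlt3AltLoop bin [] 0

-- ===== PRECONDITION & SPEC =====
def Spec_mlt3_encode (bin : List Int) (out : List Int) : Prop := out = mlt3_encode_alt bin
instance (bin : List Int) (out : List Int) : Decidable (Spec_mlt3_encode bin out) := by unfold Spec_mlt3_encode; infer_instance

-- ===== CLAIM (what is proved, stated in full; the proofs are below) =====
def Claim_equal_mlt3_encode : Prop := ∀ (bin : List Int), Dom_mlt3_encode bin → Spec_mlt3_encode bin (mlt3_encode bin)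

-- ===== LEMMAS AND PROOFS =====

-- A's (last, adder) state as a function of the ones-count k
def lastOf (k : Int) : Int := LEVELS.getD (PySem.Int.mod k 4).toNat 0
def adderOf (k : Int) : Int := if PySem.Int.mod k 4 = 0 ∨ PySem.Int.mod k 4 = 1 then 1 else -1

lemma mlt3Loop_eq_alt (bin : List Int) :
    ∀ (acc : List Int) (k : Int), 0 ≤ k →
      mlt3Loop bin acc (lastOf k) (adderOf k) = mlt3AltLoop bin acc k := by
  induction bin with
  | nil => intro acc k hk; rfl
  | cons bit rest ih =>
    intro acc k hk
    have hmod : PySem.Int.mod k 4 = k % 4 :=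
      PySem.Int.mod_eq_emod_of_pos (show (0:Int) < 4 by norm_num)
    have hmod1 : PySem.Int.mod (k + 1) 4 = (k + 1) % 4 :=
      PySem.Int.mod_eq_emod_of_pos (show (0:Int) < 4 by norm_num)
    by_cases hb : bit = 0
    · subst hb
      simp only [mlt3Loop, mlt3AltLoop, beq_self_eq_true, if_pos, bne_self_eq_false,
        Bool.false_eq_true, if_neg, ite_false]
      simpa [lastOf] using ih (acc ++ [lastOf k]) k hk
    · have h4 : k % 4 = 0 ∨ k % 4 = 1 ∨ k % 4 = 2 ∨ k % 4 = 3 := by omega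
      rcases h4 with h | h | h | h
      · -- k%4 = 0 : (last, adder) = (0, 1) → (1, 1)
        have hk1 : (k + 1) % 4 = 1 := by omega
        have hL : lastOf k = 0 := by simp [lastOf, hmod, h, LEVELS]
        have hA : adderOf k = 1 := by simp [adderOf, hmod, h]
        have hrec := ih (acc ++ [(1 : Int)]) (k + 1) (by omega)
        have hL1 : lastOf (k + 1) = 1 := by simp [lastOf, hmod1, hk1, LEVELS]
        have hA1 : adderOf (k + 1) = 1 := by simp [adderOf, hmod1, hk1]
        rw [hL1, hA1] at hrec
        have ht : (PySem.Int.mod (k + 1) 4).toNat = ((k + 1) % 4).toNat := by rw [hmod1]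
        rw [hk1] at ht
        norm_num [mlt3Loop, mlt3AltLoop, hb, hL, hA, ht, LEVELS]
        rw [hk1]
        exact hrec
      · -- k%4 = 1 : (1, 1) → (0, -1)
        have hk1 : (k + 1) % 4 = 2 := by omega
        have hL : lastOf k = 1 := by simp [lastOf, hmod, h, LEVELS]
        have hA : adderOf k = 1 := by simp [adderOf, hmod, h]
        have hrec := ih (acc ++ [(0 : Int)]) (k + 1) (by omega)
        have hL1 : lastOf (k + 1) = 0 := by simp [lastOf, hmod1, hk1, LEVELS]
        have hA1 : adderOf (k + 1) = -1 := by simp [adderOf, hmod1, hk1]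
        rw [hL1, hA1] at hrec
        have ht : (PySem.Int.mod (k + 1) 4).toNat = ((k + 1) % 4).toNat := by rw [hmod1]
        rw [hk1] at ht
        norm_num [mlt3Loop, mlt3AltLoop, hb, hL, hA, ht, LEVELS]
        rw [hk1]
        exact hrec
      · -- k%4 = 2 : (0, -1) → (-1, -1)
        have hk1 : (k + 1) % 4 = 3 := by omega
        have hL : lastOf k = 0 := by simp [lastOf, hmod, h, LEVELS]
        have hA : adderOf k = -1 := by simp [adderOf, hmod, h]
        have hrec := ih (acc ++ [(-1 : Int)]) (k + 1) (by omega)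
        have hL1 : lastOf (k + 1) = -1 := by simp [lastOf, hmod1, hk1, LEVELS]
        have hA1 : adderOf (k + 1) = -1 := by simp [adderOf, hmod1, hk1]
        rw [hL1, hA1] at hrec
        have ht : (PySem.Int.mod (k + 1) 4).toNat = ((k + 1) % 4).toNat := by rw [hmod1]
        rw [hk1] at ht
        norm_num [mlt3Loop, mlt3AltLoop, hb, hL, hA, ht, LEVELS]
        rw [hk1]
        exact hrec
      · -- k%4 = 3 : (-1, -1) → (0, 1)
        have hk1 : (k + 1) % 4 = 0 := by omega
        have hL : lastOf k = -1 := by simp [lastOf, hmod, h, LEVELS]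
        have hA : adderOf k = -1 := by simp [adderOf, hmod, h]
        have hrec := ih (acc ++ [(0 : Int)]) (k + 1) (by omega)
        have hL1 : lastOf (k + 1) = 0 := by simp [lastOf, hmod1, hk1, LEVELS]
        have hA1 : adderOf (k + 1) = 1 := by simp [adderOf, hmod1, hk1]
        rw [hL1, hA1] at hrec
        have ht : (PySem.Int.mod (k + 1) 4).toNat = ((k + 1) % 4).toNat := by rw [hmod1]
        rw [hk1] at ht
        norm_num [mlt3Loop, mlt3AltLoop, hb, hL, hA, ht, LEVELS]
        rw [hk1]
        exact hrec

-- ===== VERDICT (by name: the statement is the Claim_ definition above) =====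
theorem mlt3_encode_spec : Claim_equal_mlt3_encode := by
  intro bin _
  unfold Spec_mlt3_encode mlt3_encode mlt3_encode_alt
  have h := mlt3Loop_eq_alt bin [] 0 (by norm_num)
  have hL : lastOf 0 = 0 := by decide
  have hA : adderOf 0 = 1 := by decide
  rw [hL, hA] at h
  exact h
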